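-- pv_equiv track=rewrite | github.com/bioinfo-ucsd/BISB-Bootcamp-2024 | modules/pair-prog/pairprog.py | neighbors
-- ===== SOURCE A (Python) =====
-- def hamming_distance(str1: str, str2: str):
--     distance = 0
--     for nt1, nt2 in zip(str1, str2):
--         if nt1 != nt2:
--             distance += 1
--     return distance
--
-- def neighbors(pattern: str, d: int):
--     if d == 0:
--         return {pattern}
--     if len(pattern) == 1:
--         return {'A', 'C', 'G', 'T'}
--
--     neighborhood = set()
--     suffix_neighbors = neighbors(pattern[1:], d)
--     for text in suffix_neighbors:
--         if hamming_distance(pattern[1:], text) < d: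
--             for x in {'A', 'C', 'G', 'T'}:
--                 neighborhood.add(x + text)
--         else:
--             neighborhood.add(pattern[0] + text)
--     return neighborhood
-- ===== SOURCE B (Python) =====
-- def neighbors(pattern: str, d: int):
--     if d == 0:
--         return {pattern}
--     if len(pattern) == 1:
--         return {'A', 'C', 'G', 'T'}
--     # bottom-up over ever longer suffixes, carrying each neighbor's exact
--     # Hamming distance in a dict so it is never recomputed
--     last = pattern[-1]
--     cur = {'A', 'C', 'G', 'T'}
--     dist = {x: int(x != last) for x in cur}
--     for first in reversed(pattern[:-1]):
--         nxt, ndist = set(), {}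
--         for text in cur:
--             k = dist[text]
--             if k < d:
--                 for x in {'A', 'C', 'G', 'T'}:
--                     nxt.add(x + text)
--                     ndist[x + text] = k + (x != first)
--             else:
--                 nxt.add(first + text)
--                 ndist[first + text] = k
--         cur, dist = nxt, ndist
--     return cur
-- ===== Notes on version B (the rewrite author's own statement) =====
-- stated objective: alternative
-- what changed: B replaces A's top-down recursion by a bottom-up iterative loop over ever longer suffixes that carries each neighbor's exact Hamming distance in a dict, so A's per-neighbor hamming_distance rescan of the suffix disappears; intended as faster per element, but the neighborhood itself grows exponentially and a timing run could not confirm an end-to-end speed-up (both versions time out together on large inputs).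
import Mathlib
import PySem

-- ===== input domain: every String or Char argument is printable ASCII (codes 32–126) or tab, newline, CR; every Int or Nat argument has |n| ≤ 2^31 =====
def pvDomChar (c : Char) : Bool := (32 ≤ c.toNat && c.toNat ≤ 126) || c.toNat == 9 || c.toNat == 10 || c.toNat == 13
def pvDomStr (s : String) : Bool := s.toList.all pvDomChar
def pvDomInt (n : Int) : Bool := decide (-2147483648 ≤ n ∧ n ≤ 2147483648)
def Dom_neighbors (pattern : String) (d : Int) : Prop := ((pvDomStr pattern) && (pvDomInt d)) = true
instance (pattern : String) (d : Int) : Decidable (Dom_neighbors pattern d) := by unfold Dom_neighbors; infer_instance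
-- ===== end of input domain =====

-- B replaces A's recursion by a bottom-up loop over ever longer suffixes that carries each
-- neighbor's exact Hamming distance in a dict, so A's per-neighbor hamming_distance rescan
-- of the suffix disappears.

-- ===== PORT A =====
-- hamming_distance, on strings as lists of characters
def hammingDistance (str1 str2 : List Char) : Int :=
  (List.zip str1 str2).foldl (fun distance p => if p.1 ≠ p.2 then distance + 1 else distance) 0

-- neighbors, on the pattern's character list; 'x + text' is cons of the 1-char string x.
-- The [] arm with d ≠ 0 is unreachable under Pre_ (Python recurses forever there).
def neighborsA (cs : List Char) (d : Int) : PySem.Set (List Char) :=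
  if d = 0 then PySem.Set.ofList [cs]
  else match cs with
  | [] => PySem.Set.empty
  | [_] => PySem.Set.ofList [['A'], ['C'], ['G'], ['T']]
  | p :: rest =>
    (neighborsA rest d).foldl (fun neighborhood text =>
      if hammingDistance rest text < d then
        (PySem.Set.ofList ['A', 'C', 'G', 'T']).foldl
          (fun neighborhood x => PySem.Set.add neighborhood (x :: text)) neighborhood
      else PySem.Set.add neighborhood (p :: text)) PySem.Set.empty

def neighbors (pattern : String) (d : Int) : List String :=
  (neighborsA pattern.toList d).map String.ofList

-- ===== PORT B =====
-- the body of Source B's 'for first in reversed(pattern[:-1])' loop: one pass over the current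
-- suffix's neighborhood, building the next (set, distance-dict) pair; 'k = dist[text]' is
-- dct.getD text 0 — the key is always present (loop invariant proved below), so getD is exact
def bLevel (d : Int) (first : Char)
    (st : PySem.Set (List Char) × PySem.Dict (List Char) Int) :
    PySem.Set (List Char) × PySem.Dict (List Char) Int :=
  st.1.foldl (fun st2 text =>
    if st.2.getD text 0 < d then
      (PySem.Set.ofList ['A', 'C', 'G', 'T']).foldl
        (fun st3 x => (PySem.Set.add st3.1 (x :: text),
          st3.2.insert (x :: text) (st.2.getD text 0 + (if x ≠ first then 1 else 0)))) st2
    else (PySem.Set.add st2.1 (first :: text),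
      st2.2.insert (first :: text) (st.2.getD text 0)))
    (PySem.Set.empty, PySem.Dict.empty)

def altL (cs : List Char) (d : Int) : PySem.Set (List Char) :=
  if d = 0 then PySem.Set.ofList [cs]
  else if cs.length = 1 then PySem.Set.ofList [['A'], ['C'], ['G'], ['T']]
  else
    -- last = pattern[-1] (IndexError on the empty pattern is outside Pre_)
    let last : Char := PySem.List.pyGetD cs (-1) 'A'
    let cur0 : PySem.Set (List Char) := PySem.Set.ofList [['A'], ['C'], ['G'], ['T']]
    -- dist = {x: int(x != last) for x in cur}
    let dist0 : PySem.Dict (List Char) Int :=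
      cur0.foldl (fun dct x => dct.insert x (if x ≠ [last] then 1 else 0)) PySem.Dict.empty
    (((PySem.List.slice cs none (some (-1))).reverse).foldl
      (fun st first => bLevel d first st) (cur0, dist0)).1

def neighbors_alt (pattern : String) (d : Int) : List String :=
  (altL pattern.toList d).map String.ofList

-- ===== PRECONDITION & SPEC =====
-- Pre_ excludes only pattern = "" with d ≠ 0, where Python A hits unbounded recursion
-- (RecursionError) and Python B raises IndexError on pattern[-1].
def Pre_neighbors (pattern : String) (d : Int) : Prop := pattern = "" → d = 0
instance (pattern : String) (d : Int) : Decidable (Pre_neighbors pattern d) := by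
  unfold Pre_neighbors; infer_instance
def pvWitness_neighbors : String × Int := ("ACG", 1)

def Spec_neighbors (pattern : String) (d : Int) (out : List String) : Prop := out = neighbors_alt pattern d
instance (pattern : String) (d : Int) (out : List String) : Decidable (Spec_neighbors pattern d out) := by unfold Spec_neighbors; infer_instance

-- ===== CLAIM (what is proved, stated in full; the proofs are below) =====
def Claim_equal_neighbors : Prop := ∀ (pattern : String) (d : Int), Dom_neighbors pattern d → Pre_neighbors pattern d → Spec_neighbors pattern d (neighbors pattern d)

-- ===== LEMMAS AND PROOFS =====

-- one-step unfolding lemmas for the ports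
theorem neighborsA_zero (cs : List Char) : neighborsA cs 0 = PySem.Set.ofList [cs] := by
  rw [neighborsA.eq_def]; simp

theorem neighborsA_one (p : Char) (d : Int) (h : d ≠ 0) :
    neighborsA [p] d = PySem.Set.ofList [['A'], ['C'], ['G'], ['T']] := by
  rw [neighborsA.eq_def]; simp [h]

theorem neighborsA_cons (p q : Char) (rest : List Char) (d : Int) (h : d ≠ 0) :
    neighborsA (p :: q :: rest) d
      = (neighborsA (q :: rest) d).foldl (fun neighborhood text =>
          if hammingDistance (q :: rest) text < d then
            (PySem.Set.ofList ['A', 'C', 'G', 'T']).foldl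
              (fun neighborhood x => PySem.Set.add neighborhood (x :: text)) neighborhood
          else PySem.Set.add neighborhood (p :: text)) PySem.Set.empty := by
  rw [neighborsA.eq_def]; simp [h]

theorem altL_zero (cs : List Char) : altL cs 0 = PySem.Set.ofList [cs] := by
  unfold altL; simp

theorem altL_one (p : Char) (d : Int) (h : d ≠ 0) :
    altL [p] d = PySem.Set.ofList [['A'], ['C'], ['G'], ['T']] := by
  unfold altL; simp [h]

theorem altL_big (cs : List Char) (d : Int) (h : d ≠ 0) (h1 : cs.length ≠ 1) :
    altL cs d
      = (((PySem.List.slice cs none (some (-1))).reverse).foldl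
          (fun st first => bLevel d first st)
          (PySem.Set.ofList [['A'], ['C'], ['G'], ['T']],
           (PySem.Set.ofList [['A'], ['C'], ['G'], ['T']]).foldl
             (fun dct x => dct.insert x
               (if x ≠ [PySem.List.pyGetD cs (-1) 'A'] then 1 else 0)) PySem.Dict.empty)).1 := by
  unfold altL; simp [h, h1]

theorem hamming_shift (l : List (Char × Char)) (i : Int) :
    l.foldl (fun distance p => if p.1 ≠ p.2 then distance + 1 else distance) i
      = i + l.foldl (fun distance p => if p.1 ≠ p.2 then distance + 1 else distance) 0 := by
  induction l generalizing i with
  | nil => simp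
  | cons a l ih =>
    simp only [List.foldl_cons]
    rw [ih, ih (if a.1 ≠ a.2 then 0 + 1 else 0)]
    split <;> ring

theorem hamming_cons (a b : Char) (l1 l2 : List Char) :
    hammingDistance (a :: l1) (b :: l2)
      = (if a ≠ b then 1 else 0) + hammingDistance l1 l2 := by
  simp only [hammingDistance, List.zip_cons_cons, List.foldl_cons]
  rw [hamming_shift]
  split <;> simp

-- pattern[-1] on a nonempty list is its last element
theorem pyGetD_neg_one (cs : List Char) (h : cs ≠ []) :
    PySem.List.pyGetD cs (-1) 'A' = cs.getLast h := by
  have hlp : 0 < cs.length := List.length_pos_iff.mpr h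
  simp only [PySem.List.pyGetD, PySem.List.pyGet?, PySem.List.pyIdx?]
  rw [if_neg (by omega), if_pos (by omega)]
  have h1 : ((-(-1 : Int)).toNat) = 1 := by decide
  rw [h1]
  have h2 : cs[cs.length - 1]? = some (cs.getLast h) := by
    rw [List.getElem?_eq_getElem (by omega)]
    simp [List.getLast_eq_getElem]
  simp [h2]

-- one generated block: prepending each x ∈ xs to text, recording distance k + (x ≠ first),
-- keeps the dict invariant and tracks A's set-only fold
theorem consBlock_inv (p : Char) (suf text : List Char) (k : Int)
    (hk : k = hammingDistance suf text) (xs : List Char)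
    (st3 : PySem.Set (List Char) × PySem.Dict (List Char) Int)
    (hinv3 : ∀ u ∈ st3.1, st3.2.getD u 0 = hammingDistance (p :: suf) u) :
    (xs.foldl (fun st3 x => (PySem.Set.add st3.1 (x :: text),
        st3.2.insert (x :: text) (k + (if x ≠ p then 1 else 0)))) st3).1
      = xs.foldl (fun nb x => PySem.Set.add nb (x :: text)) st3.1
    ∧ ∀ u ∈ (xs.foldl (fun st3 x => (PySem.Set.add st3.1 (x :: text),
        st3.2.insert (x :: text) (k + (if x ≠ p then 1 else 0)))) st3).1,
        (xs.foldl (fun st3 x => (PySem.Set.add st3.1 (x :: text),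
          st3.2.insert (x :: text) (k + (if x ≠ p then 1 else 0)))) st3).2.getD u 0
          = hammingDistance (p :: suf) u := by
  induction xs generalizing st3 with
  | nil => exact ⟨rfl, hinv3⟩
  | cons x xs ih =>
    simp only [List.foldl_cons]
    refine ih _ ?_
    intro u hu
    rw [PySem.Dict.getD_insert]
    by_cases he : u = x :: text
    · rw [if_pos he, he, hamming_cons, ← hk]
      by_cases hxp : x = p
      · simp [hxp]
      · have hpx : p ≠ x := fun hh => hxp hh.symm
        simp only [if_pos hxp, if_pos hpx]
        ring
    · rw [if_neg he]
      rcases (PySem.Set.mem_add _ _ _).mp hu with hm | hm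
      · exact hinv3 u hm
      · exact absurd hm he

-- one level: folding B's paired step over any list of suffix neighbors whose stored
-- distances are correct tracks A's set-only fold and keeps the dict invariant
theorem pairLoop_inv (d : Int) (p : Char) (suf : List Char)
    (dct : PySem.Dict (List Char) Int) (Lst : List (List Char))
    (hd : ∀ t ∈ Lst, dct.getD t 0 = hammingDistance suf t)
    (st2 : PySem.Set (List Char) × PySem.Dict (List Char) Int)
    (hinv2 : ∀ u ∈ st2.1, st2.2.getD u 0 = hammingDistance (p :: suf) u) :
    (Lst.foldl (fun st2 text =>
      if dct.getD text 0 < d then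
        (PySem.Set.ofList ['A', 'C', 'G', 'T']).foldl
          (fun st3 x => (PySem.Set.add st3.1 (x :: text),
            st3.2.insert (x :: text) (dct.getD text 0 + (if x ≠ p then 1 else 0)))) st2
      else (PySem.Set.add st2.1 (p :: text),
        st2.2.insert (p :: text) (dct.getD text 0))) st2).1
      = Lst.foldl (fun neighborhood text =>
          if hammingDistance suf text < d then
            (PySem.Set.ofList ['A', 'C', 'G', 'T']).foldl
              (fun neighborhood x => PySem.Set.add neighborhood (x :: text)) neighborhood
          else PySem.Set.add neighborhood (p :: text)) st2.1
    ∧ ∀ u ∈ (Lst.foldl (fun st2 text =>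
        if dct.getD text 0 < d then
          (PySem.Set.ofList ['A', 'C', 'G', 'T']).foldl
            (fun st3 x => (PySem.Set.add st3.1 (x :: text),
              st3.2.insert (x :: text) (dct.getD text 0 + (if x ≠ p then 1 else 0)))) st2
        else (PySem.Set.add st2.1 (p :: text),
          st2.2.insert (p :: text) (dct.getD text 0))) st2).1,
        (Lst.foldl (fun st2 text =>
          if dct.getD text 0 < d then
            (PySem.Set.ofList ['A', 'C', 'G', 'T']).foldl
              (fun st3 x => (PySem.Set.add st3.1 (x :: text),
                st3.2.insert (x :: text) (dct.getD text 0 + (if x ≠ p then 1 else 0)))) st2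
          else (PySem.Set.add st2.1 (p :: text),
            st2.2.insert (p :: text) (dct.getD text 0))) st2).2.getD u 0
          = hammingDistance (p :: suf) u := by
  induction Lst generalizing st2 with
  | nil => exact ⟨rfl, hinv2⟩
  | cons text Lst ihL =>
    have hk : dct.getD text 0 = hammingDistance suf text := hd text (by simp)
    have h4 : (PySem.Set.ofList ['A', 'C', 'G', 'T']) = (['A', 'C', 'G', 'T'] : List Char) := by
      decide
    simp only [List.foldl_cons, hk, h4]
    by_cases hc : hammingDistance suf text < d
    · rw [if_pos hc, if_pos hc]
      have hblock := consBlock_inv p suf text (hammingDistance suf text) rfl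
        ['A', 'C', 'G', 'T'] st2 hinv2
      have := ihL (fun t ht => hd t (by simp [ht])) _ hblock.2
      rw [hblock.1] at this
      exact this
    · rw [if_neg hc, if_neg hc]
      refine ihL (fun t ht => hd t (by simp [ht])) _ ?_
      intro u hu
      rw [PySem.Dict.getD_insert]
      by_cases he : u = p :: text
      · rw [if_pos he, he, hamming_cons]
        simp
      · rw [if_neg he]
        rcases (PySem.Set.mem_add _ _ _).mp hu with hm | hm
        · exact hinv2 u hm
        · exact absurd hm he

-- folding B's levels over the remaining characters (in reverse) reaches A's
-- neighborhood of the extended suffix, dict invariant included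
theorem levels_inv (d : Int) (hd0 : d ≠ 0) (ps : List Char) :
    ∀ (suf : List Char), suf ≠ [] →
    ∀ (st : PySem.Set (List Char) × PySem.Dict (List Char) Int),
      st.1 = neighborsA suf d →
      (∀ u ∈ st.1, st.2.getD u 0 = hammingDistance suf u) →
      (ps.foldl (fun st first => bLevel d first st) st).1 = neighborsA (ps.reverse ++ suf) d
      ∧ ∀ u ∈ (ps.foldl (fun st first => bLevel d first st) st).1,
          (ps.foldl (fun st first => bLevel d first st) st).2.getD u 0
            = hammingDistance (ps.reverse ++ suf) u := by
  induction ps with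
  | nil =>
    intro suf _ st hset hinv
    simpa using ⟨hset, hinv⟩
  | cons p ps ih =>
    intro suf hne st hset hinv
    obtain ⟨q, rest', rfl⟩ : ∃ q rest', suf = q :: rest' := by
      cases suf with
      | nil => exact absurd rfl hne
      | cons q rest' => exact ⟨q, rest', rfl⟩
    have hloop := pairLoop_inv d p (q :: rest') st.2 st.1
      (fun t ht => hinv t ht) (PySem.Set.empty, PySem.Dict.empty) (by simp [PySem.Set.empty])
    have hset' : (bLevel d p st).1 = neighborsA (p :: q :: rest') d := by
      rw [neighborsA_cons p q rest' d hd0, ← hset]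
      exact hloop.1
    have hinv' : ∀ u ∈ (bLevel d p st).1,
        (bLevel d p st).2.getD u 0 = hammingDistance (p :: q :: rest') u := hloop.2
    have := ih (p :: q :: rest') (by simp) (bLevel d p st) hset' hinv'
    simpa [List.foldl_cons, List.reverse_cons, List.append_assoc] using this

-- the ports agree on every admitted character list
theorem altL_eq (cs : List Char) (d : Int) (hpre : cs = [] → d = 0) :
    altL cs d = neighborsA cs d := by
  by_cases h : d = 0
  · subst h; rw [altL_zero, neighborsA_zero]
  · have hne : cs ≠ [] := fun hc => h (hpre hc)
    match cs, hne with
    | [p], _ => rw [altL_one p d h, neighborsA_one p d h]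
    | p :: q :: rest, _ =>
      have h1 : (p :: q :: rest).length ≠ 1 := by simp
      rw [altL_big (p :: q :: rest) d h h1]
      have hne2 : (p :: q :: rest) ≠ [] := by simp
      have hlast : PySem.List.pyGetD (p :: q :: rest) (-1) 'A' = (p :: q :: rest).getLast hne2 :=
        pyGetD_neg_one _ hne2
      set last := (p :: q :: rest).getLast hne2 with hlastdef
      rw [hlast]
      have hsl : PySem.List.slice (p :: q :: rest) none (some (-1)) = (p :: q :: rest).dropLast :=
        PySem.List.slice_to_neg_one _
      rw [hsl]
      have hcur0 : (PySem.Set.ofList [['A'], ['C'], ['G'], ['T']] : PySem.Set (List Char))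
          = [['A'], ['C'], ['G'], ['T']] := by decide
      -- the base dict stores the exact distance of each 1-character neighbor from [last]
      have hbase : ∀ u ∈ (PySem.Set.ofList [['A'], ['C'], ['G'], ['T']] : PySem.Set (List Char)),
          ((PySem.Set.ofList [['A'], ['C'], ['G'], ['T']] : PySem.Set (List Char)).foldl
            (fun dct x => dct.insert x (if x ≠ [last] then 1 else 0))
            PySem.Dict.empty).getD u 0 = hammingDistance [last] u := by
        intro u hu
        rw [hcur0] at hu ⊢
        have hval : ∀ x : Char, (if x = last then (0 : Int) else 1)
            = hammingDistance [last] [x] := by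
          intro x
          rw [hamming_cons]
          by_cases hx : x = last
          · simp [hx, hammingDistance]
          · have h2 : last ≠ x := fun hh => hx hh.symm
            simp [hx, h2, hammingDistance]
        simp only [List.foldl_cons, List.foldl_nil]
        simp only [List.mem_cons, List.not_mem_nil, or_false] at hu
        rcases hu with rfl | rfl | rfl | rfl <;>
          simp [PySem.Dict.getD_insert, hval]
      have hbase1 : (PySem.Set.ofList [['A'], ['C'], ['G'], ['T']] : PySem.Set (List Char))
          = neighborsA [last] d := (neighborsA_one last d h).symm
      have hmain := levels_inv d h ((p :: q :: rest).dropLast.reverse) [last] (by simp)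
        (PySem.Set.ofList [['A'], ['C'], ['G'], ['T']],
         (PySem.Set.ofList [['A'], ['C'], ['G'], ['T']] : PySem.Set (List Char)).foldl
           (fun dct x => dct.insert x (if x ≠ [last] then 1 else 0)) PySem.Dict.empty)
        hbase1 hbase
      rw [hmain.1, List.reverse_reverse]
      have : (p :: q :: rest).dropLast ++ [last] = p :: q :: rest := by
        rw [hlastdef]
        exact List.dropLast_concat_getLast hne2
      rw [this]

-- ===== VERDICT (by name: the statement is the Claim_ definition above) =====
theorem neighbors_spec : Claim_equal_neighbors := by
  intro pattern d _ hpre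
  unfold Spec_neighbors neighbors neighbors_alt
  rw [altL_eq pattern.toList d ?_]
  intro hc
  apply hpre
  have h2 := congrArg String.ofList hc
  simpa using h2
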